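-- pv_equiv track=rewrite | github.com/AhnDogeon/Algorithm | 시험/dd2.py | solution
-- ===== SOURCE A (Python) =====
-- def solution(S):
--     minH = "z" * len(S)
--     minidx = 1
--     for i in range(len(S)):
--         result = S[:i] + S[i+1:]
--         if result < minH:
--             minH = result
--             minidx = i
--     return minH
-- ===== SOURCE B (Python) =====
-- def solution(S):
--     # Greedy: delete the first character that is greater than its successor;
--     # if the string is non-increasing nowhere, delete the last character.
--     for i in range(len(S) - 1):
--         if S[i] > S[i + 1]:
--             return S[:i] + S[i + 1:]
--     return S[:-1]
-- ===== Notes on version B (the rewrite author's own statement) =====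
-- stated objective: faster
-- what changed: Replaced the O(n^2) scan that builds every one-character deletion and keeps the minimum with the O(n) greedy rule: delete the first character greater than its successor, else the last character.
-- intended difference: On strings whose first two characters other than lowercase z both rank above lowercase z in code-point order, A's sentinel of len(S) copies of lowercase z compares smaller than every one-character deletion, so A returns that sentinel rather than any deletion of S, while B returns the lexicographically smallest one-character deletion, which is the intended value. — e.g. on solution("~~"): A returns "zz", B returns "~"
import Mathlib
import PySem

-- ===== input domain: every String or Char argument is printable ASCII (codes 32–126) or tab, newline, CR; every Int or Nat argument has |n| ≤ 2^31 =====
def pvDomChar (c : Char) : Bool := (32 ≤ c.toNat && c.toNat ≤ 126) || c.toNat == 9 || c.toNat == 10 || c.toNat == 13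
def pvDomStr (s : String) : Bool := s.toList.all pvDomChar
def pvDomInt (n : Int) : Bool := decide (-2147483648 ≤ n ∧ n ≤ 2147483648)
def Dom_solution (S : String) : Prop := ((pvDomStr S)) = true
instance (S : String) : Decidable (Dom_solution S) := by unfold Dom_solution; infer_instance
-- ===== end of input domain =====

-- B replaces A's quadratic minimum-over-all-deletions scan with the linear greedy rule
-- (delete the first character greater than its successor, else the last one).

-- ===== PORT A =====
def solution (S : String) : String :=
  let s := S.toList
  let n : Int := PySem.Chars.len s
  let minH := PySem.List.pyRepeat ['z'] n
  let r := (PySem.List.pyRange 0 n 1).foldl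
      (fun (st : List Char × Int) i =>
        let result := PySem.List.slice s none (some i) ++ PySem.List.slice s (some (i + 1)) none
        if result < st.1 then (result, i) else st)
      (minH, (1 : Int))
  String.ofList r.1

-- ===== PORT B =====
-- the loop "for i in range(len(S)-1): if S[i] > S[i+1]: return i-th deletion" as a scan
def altScan : List Char → Nat → Option Nat
  | x :: y :: t, i => if y < x then some i else altScan (y :: t) (i + 1)
  | _, _ => none

def solution_alt (S : String) : String :=
  let s := S.toList
  match altScan s 0 with
  | some i => String.ofList (PySem.List.slice s none (some (i : Int)) ++ PySem.List.slice s (some ((i : Int) + 1)) none)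
  | none => String.ofList (PySem.List.slice s none (some (-1)))

-- ===== PRECONDITION & SPEC =====
-- On strings whose first two characters other than lowercase z both rank above lowercase z,
-- A's sentinel of len(S) copies of lowercase z is smaller than every one-character deletion, so A
-- returns the sentinel (not a deletion of S at all), while B returns the lexicographically
-- smallest deletion — the intended value.
def D_solution (S : String) : Prop :=
  2 ≤ (S.toList.filter (fun c => c ≠ 'z')).length ∧
    ((S.toList.filter (fun c => c ≠ 'z')).take 2).all (fun c => decide ('z' < c)) = true
instance (S : String) : Decidable (D_solution S) := by unfold D_solution; infer_instance

def Spec_solution (S : String) (out : String) : Prop := ¬ D_solution S → out = solution_alt S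
instance (S : String) (out : String) : Decidable (Spec_solution S out) := by unfold Spec_solution; infer_instance

def pvDiffWitness_solution : String := "~~"
def pvDiffWitnessOut_solution : String × String := ("zz", "~")

-- ===== CLAIM (what is proved, stated in full; the proofs are below) =====
def Claim_unchanged_solution : Prop := ∀ (S : String), Dom_solution S → Spec_solution S (solution S)
def Claim_changed_solution : Prop := Dom_solution (pvDiffWitness_solution) ∧ D_solution (pvDiffWitness_solution) ∧ solution (pvDiffWitness_solution) = pvDiffWitnessOut_solution.1 ∧ solution_alt (pvDiffWitness_solution) = pvDiffWitnessOut_solution.2 ∧ pvDiffWitnessOut_solution.1 ≠ pvDiffWitnessOut_solution.2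
def Claim_exact_solution : Prop := ∀ (S : String), Dom_solution S → D_solution S → solution S ≠ solution_alt S

-- ===== LEMMAS AND PROOFS =====

-- the i-th one-character deletion
def delAt (s : List Char) (i : Nat) : List Char := s.take i ++ s.drop (i + 1)

-- the greedy deletion, in direct recursive form (proof-side mirror of B's loop)
def gdel : List Char → List Char
  | x :: y :: t => if y < x then y :: t else x :: gdel (y :: t)
  | _ => []

-- A's loop, proof-side: minimum over all deletions starting from the sentinel
def Amin (s : List Char) : List Char :=
  (List.range s.length).foldl (fun m k => if delAt s k < m then delAt s k else m)
    (List.replicate s.length 'z')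

-- "the first character other than lowercase z (if any) is below it" — exactly when a list beats the sentinel
def Pc (c : List Char) : Prop := ∀ a ∈ (c.filter (fun x => x ≠ 'z')).head?, a < 'z'

-- match-shaped version of D_solution for the inductions
def Dm (s : List Char) : Prop :=
  match s.filter (fun c => c ≠ 'z') with
  | a :: b :: _ => 'z' < a ∧ 'z' < b
  | _ => False

lemma D_iff (S : String) : D_solution S ↔ Dm S.toList := by
  unfold D_solution Dm
  rcases h : S.toList.filter (fun c => c ≠ 'z') with _ | ⟨a, _ | ⟨b, r⟩⟩
  · simp [h]
  · simp [h]
  · simp only [h, List.length_cons, List.take_succ_cons, List.take_zero, List.all_cons,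
      List.all_nil, Bool.and_true, Bool.and_eq_true, decide_eq_true_eq]
    constructor
    · rintro ⟨-, ha, hb⟩; exact ⟨ha, hb⟩
    · rintro ⟨ha, hb⟩; exact ⟨by omega, ha, hb⟩

lemma pair_fold (f : Int → List Char) :
    ∀ (is : List Int) (m0 : List Char) (j0 : Int),
      (is.foldl (fun (st : List Char × Int) i => if f i < st.1 then (f i, i) else st) (m0, j0)).1
        = is.foldl (fun m i => if f i < m then f i else m) m0 := by
  intro is
  induction is with
  | nil => intro m0 j0; rfl
  | cons i t ih =>
      intro m0 j0
      simp only [List.foldl]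
      by_cases h : f i < m0 <;> simp [h, ih]

lemma solution_eq (S : String) : solution S = String.ofList (Amin S.toList) := by
  unfold Amin
  simp only [solution]
  rw [show PySem.Chars.len S.toList = ((S.toList.length : Nat) : Int) from by simp [pysem]]
  rw [PySem.List.pyRange_zero_natCast, PySem.List.pyRepeat_singleton]
  rw [pair_fold, List.foldl_map]
  simp only [Int.toNat_natCast]
  refine congrArg String.ofList ?_
  congr 1
  funext m k
  have h1 : PySem.List.slice S.toList none (some ((k : Nat) : Int)) = S.toList.take k :=
    PySem.List.slice_to_natCast _ _
  have h2 : PySem.List.slice S.toList (some (((k : Nat) : Int) + 1)) none = S.toList.drop (k + 1) := by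
    have h3 : ((k : Nat) : Int) + 1 = (((k + 1 : Nat)) : Int) := by push_cast; ring
    rw [h3, PySem.List.slice_from_natCast]
  simp [h1, h2, delAt]

lemma scan_shift : ∀ (s : List Char) (d : Nat),
    altScan s d = (altScan s 0).map (· + d) := by
  intro s
  induction s with
  | nil => intro d; rfl
  | cons x t ih =>
      intro d
      match t with
      | [] => rfl
      | y :: t' =>
          show altScan (x :: y :: t') d = _
          unfold altScan
          by_cases h : y < x
          · simp [h]
          · simp only [if_neg h]
            rw [ih (d + 1), ih 1]
            cases h0 : altScan (y :: t') 0 <;> simp; omega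

lemma scan_res : ∀ (s : List Char),
    (match altScan s 0 with
     | some k => s.take k ++ s.drop (k + 1)
     | none => s.dropLast) = gdel s := by
  intro s
  induction s with
  | nil => rfl
  | cons x t ih =>
      match t with
      | [] => rfl
      | y :: t' =>
          show (match altScan (x :: y :: t') 0 with
                | some k => (x :: y :: t').take k ++ (x :: y :: t').drop (k + 1)
                | none => (x :: y :: t').dropLast) = gdel (x :: y :: t')
          unfold altScan gdel
          by_cases h : y < x
          · simp [h]
          · simp only [if_neg h]
            rw [scan_shift (y :: t') 1]
            cases h0 : altScan (y :: t') 0 with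
            | none =>
                simp only [Option.map_none]
                have := ih; rw [h0] at this
                simpa using congrArg (x :: ·) this
            | some k =>
                simp only [Option.map_some]
                have := ih; rw [h0] at this
                simp only [List.take_succ_cons, List.drop_succ_cons] at this ⊢
                rw [← this]
                simp

lemma alt_eq (S : String) : solution_alt S = String.ofList (gdel S.toList) := by
  unfold solution_alt
  rw [← scan_res S.toList]
  cases h : altScan S.toList 0 with
  | none =>
      simp only [h]
      rw [PySem.List.slice_to_neg_one]
  | some k =>
      simp only [h]
      congr 1
      have h1 : PySem.List.slice S.toList none (some ((k : Nat) : Int)) = S.toList.take k :=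
        PySem.List.slice_to_natCast _ _
      have h2 : PySem.List.slice S.toList (some (((k : Nat) : Int) + 1)) none = S.toList.drop (k + 1) := by
        have : ((k : Nat) : Int) + 1 = (((k + 1 : Nat)) : Int) := by push_cast; ring
        rw [this, PySem.List.slice_from_natCast]
      rw [h1, h2]

-- fold-minimum characterisation of A's loop body
lemma foldmin (f : Nat → List Char) :
    ∀ (is : List Nat) (m0 : List Char),
      (is.foldl (fun m k => if f k < m then f k else m) m0 = m0 ∨
        ∃ k ∈ is, is.foldl (fun m k => if f k < m then f k else m) m0 = f k) ∧
      is.foldl (fun m k => if f k < m then f k else m) m0 ≤ m0 ∧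
      ∀ k ∈ is, is.foldl (fun m k => if f k < m then f k else m) m0 ≤ f k := by
  intro is
  induction is with
  | nil => intro m0; exact ⟨Or.inl rfl, le_refl _, by simp⟩
  | cons i t ih =>
      intro m0
      simp only [List.foldl]
      by_cases h : f i < m0
      · simp only [if_pos h]
        obtain ⟨hmem, hle, hall⟩ := ih (f i)
        refine ⟨?_, le_trans hle (le_of_lt h), ?_⟩
        · rcases hmem with h1 | ⟨k, hk, h1⟩
          · exact Or.inr ⟨i, by simp, h1⟩
          · exact Or.inr ⟨k, by simp [hk], h1⟩
        · intro k hk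
          rcases List.mem_cons.mp hk with rfl | hk
          · exact hle
          · exact hall k hk
      · simp only [if_neg h]
        obtain ⟨hmem, hle, hall⟩ := ih m0
        refine ⟨?_, hle, ?_⟩
        · rcases hmem with h1 | ⟨k, hk, h1⟩
          · exact Or.inl h1
          · exact Or.inr ⟨k, by simp [hk], h1⟩
        · intro k hk
          rcases List.mem_cons.mp hk with rfl | hk
          · exact le_trans hle (not_lt.mp h)
          · exact hall k hk

lemma length_delAt (s : List Char) (i : Nat) (h : i < s.length) :
    (delAt s i).length = s.length - 1 := by
  simp [delAt]; omega

lemma delAt_cons (x : Char) (s : List Char) (k : Nat) :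
    delAt (x :: s) (k + 1) = x :: delAt s k := by
  simp [delAt]

lemma delAt_zero (x : Char) (s : List Char) : delAt (x :: s) 0 = s := by
  simp [delAt]

lemma Pc_cons_z (c : List Char) : Pc ('z' :: c) ↔ Pc c := by
  simp [Pc]

lemma Pc_cons_ne (x : Char) (c : List Char) (h : x ≠ 'z') : Pc (x :: c) ↔ x < 'z' := by
  simp [Pc, h]

lemma Dm_cons_z (c : List Char) : Dm ('z' :: c) ↔ Dm c := by
  simp [Dm]

lemma lt_repl : ∀ (c : List Char) (m : Nat), c.length < m →
    (c < List.replicate m 'z' ↔ Pc c) := by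
  intro c
  induction c with
  | nil =>
      intro m hm
      obtain ⟨m', rfl⟩ : ∃ m', m = m' + 1 := ⟨m - 1, by omega⟩
      simp only [List.replicate_succ]
      constructor
      · intro _; simp [Pc]
      · intro _; exact List.nil_lt_cons _ _
  | cons a c' ih =>
      intro m hm
      obtain ⟨m', rfl⟩ : ∃ m', m = m' + 1 := ⟨m - 1, by omega⟩
      simp only [List.replicate_succ]
      rw [List.cons_lt_cons_iff]
      rcases lt_trichotomy a 'z' with h | h | h
      · simp [h, Pc_cons_ne a c' (ne_of_lt h)]
      · subst h
        simp only [lt_irrefl, false_or, Pc_cons_z]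
        rw [ih m' (by simpa using Nat.lt_of_succ_lt_succ hm)]
        simp
      · rw [Pc_cons_ne a c' (ne_of_gt h)]
        simp [not_lt.mpr (le_of_lt h), (ne_of_gt h)]

lemma Pc_head (c : List Char) (a : Char) (r : List Char)
    (hf : c.filter (fun x => x ≠ 'z') = a :: r) (hp : Pc c) : a < 'z' := by
  apply hp
  rw [hf]
  rfl

lemma Dm_not_Pc (c : List Char) (h : Dm c) : ¬ Pc c := by
  unfold Dm at h
  rcases hf : c.filter (fun x => x ≠ 'z') with _ | ⟨a, _ | ⟨b, r⟩⟩ <;> rw [hf] at h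
  · exact absurd h not_false
  · exact absurd h not_false
  · intro hp
    exact absurd (Pc_head c a _ hf hp) (not_lt.mpr (le_of_lt h.1))

lemma exists_good : ∀ (s : List Char), ¬ Dm s → s ≠ [] →
    ∃ j < s.length, Pc (delAt s j) := by
  intro s
  induction s with
  | nil => intro _ h; exact absurd rfl h
  | cons x t ih =>
      intro hD _
      match t with
      | [] =>
          exact ⟨0, by simp, by simp [delAt_zero, Pc]⟩
      | y :: t' =>
          rcases lt_trichotomy x 'z' with hx | hx | hx
          · refine ⟨1, by simp, ?_⟩
            have : delAt (x :: y :: t') 1 = x :: delAt (y :: t') 0 := delAt_cons x _ 0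
            rw [this, Pc_cons_ne x _ (ne_of_lt hx)]
            exact hx
          · subst hx
            have hD' : ¬ Dm (y :: t') := fun h => hD ((Dm_cons_z _).mpr h)
            obtain ⟨j, hj, hp⟩ := ih hD' (by simp)
            exact ⟨j + 1, by simpa using Nat.succ_lt_succ hj,
              by rw [delAt_cons, Pc_cons_z]; exact hp⟩
          · refine ⟨0, by simp, ?_⟩
            rw [delAt_zero]
            rcases hf : (y :: t').filter (fun c => c ≠ 'z') with _ | ⟨b, r⟩
            · intro a ha
              rw [hf] at ha
              simp at ha
            · have hbne : b ≠ 'z' := by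
                have hmem : b ∈ (y :: t').filter (fun c => c ≠ 'z') := by
                  rw [hf]; exact List.mem_cons_self
                simpa using (List.mem_filter.mp hmem).2
              have hblt : b < 'z' := by
                by_contra hlt
                apply hD
                unfold Dm
                have hfs : (x :: y :: t').filter (fun c => c ≠ 'z') = x :: b :: r := by
                  rw [List.filter_cons, if_pos (by simp [hx.ne']), hf]
                rw [hfs]
                exact ⟨hx, lt_of_le_of_ne (not_lt.mp hlt) (Ne.symm hbne)⟩
              intro a ha
              rw [hf] at ha
              simp only [List.head?_cons, Option.mem_def, Option.some.injEq] at ha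
              exact ha ▸ hblt

lemma Dm_not_Pc_del : ∀ (s : List Char), Dm s → ∀ j < s.length, ¬ Pc (delAt s j) := by
  intro s
  induction s with
  | nil => intro h; exact absurd h (by simp [Dm])
  | cons x t ih =>
      intro hD j hj
      by_cases hx : x = 'z'
      · subst hx
        have hDt : Dm t := (Dm_cons_z t).mp hD
        match j with
        | 0 => rw [delAt_zero]; exact Dm_not_Pc t hDt
        | k + 1 =>
            rw [delAt_cons, Pc_cons_z]
            exact ih hDt k (by simpa using Nat.lt_of_succ_lt_succ hj)
      · have hxgt : 'z' < x := by
          unfold Dm at hD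
          rcases hf : t.filter (fun c => c ≠ 'z') with _ | ⟨b, r⟩ <;>
            · have hfs : (x :: t).filter (fun c => c ≠ 'z') = x :: t.filter (fun c => c ≠ 'z') := by
                simp [List.filter_cons, hx]
              rw [hfs, hf] at hD
              first
                | exact absurd hD not_false
                | exact hD.1
        match j with
        | 0 =>
            rw [delAt_zero]
            unfold Dm at hD
            have hfs : (x :: t).filter (fun c => c ≠ 'z') = x :: t.filter (fun c => c ≠ 'z') := by
              simp [hx]
            rcases hf : t.filter (fun c => c ≠ 'z') with _ | ⟨b, r⟩
            · rw [hfs, hf] at hD; exact absurd hD not_false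
            · rw [hfs, hf] at hD
              intro hp
              exact absurd (Pc_head t b r hf hp) (not_lt.mpr (le_of_lt hD.2))
        | k + 1 =>
            rw [delAt_cons, Pc_cons_ne x _ hx]
            exact not_lt.mpr (le_of_lt hxgt)

lemma gdel_length : ∀ (s : List Char), (gdel s).length = s.length - 1 := by
  intro s
  induction s with
  | nil => rfl
  | cons x t ih =>
      match t with
      | [] => rfl
      | y :: t' =>
          show (if y < x then y :: t' else x :: gdel (y :: t')).length = _
          by_cases h : y < x
          · simp [h]
          · simp only [if_neg h, List.length_cons]
            rw [ih]
            simp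

lemma gdel_mem : ∀ (s : List Char), s ≠ [] → ∃ i < s.length, gdel s = delAt s i := by
  intro s
  induction s with
  | nil => intro h; exact absurd rfl h
  | cons x t ih =>
      intro _
      match t with
      | [] => exact ⟨0, by simp, by simp [gdel, delAt_zero]⟩
      | y :: t' =>
          show ∃ i < (x :: y :: t').length, (if y < x then y :: t' else x :: gdel (y :: t')) = _
          by_cases h : y < x
          · exact ⟨0, by simp, by simp [h, delAt_zero]⟩
          · obtain ⟨j, hj, hje⟩ := ih (by simp)
            exact ⟨j + 1, by simpa using Nat.succ_lt_succ hj,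
              by rw [if_neg h, delAt_cons, hje]⟩

lemma gdel_min : ∀ (s : List Char), ∀ i < s.length, gdel s ≤ delAt s i := by
  intro s
  induction s with
  | nil => intro i hi; simp at hi
  | cons x t ih =>
      intro i hi
      match t with
      | [] =>
          match i with
          | 0 => simp [gdel, delAt_zero]
          | k + 1 => simp at hi
      | y :: t' =>
          show (if y < x then y :: t' else x :: gdel (y :: t')) ≤ _
          by_cases h : y < x
          · rw [if_pos h]
            match i with
            | 0 => rw [delAt_zero]
            | k + 1 =>
                rw [delAt_cons]
                exact le_of_lt (List.cons_lt_cons_iff.mpr (Or.inl h))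
          · rw [if_neg h]
            match i with
            | 0 =>
                rw [delAt_zero]
                rcases lt_or_eq_of_le (not_lt.mp h) with hxy | hxy
                · exact le_of_lt (List.cons_lt_cons_iff.mpr (Or.inl hxy))
                · subst hxy
                  have := ih 0 (by simp)
                  rw [delAt_zero] at this
                  exact List.cons_le_cons x this
            | k + 1 =>
                rw [delAt_cons]
                exact List.cons_le_cons x (ih k (by simpa using Nat.lt_of_succ_lt_succ hi))

-- A's loop equals the greedy deletion whenever some deletion beats the sentinel (¬ Dm)
lemma Amin_eq_gdel (s : List Char) (hD : ¬ Dm s) : Amin s = gdel s := by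
  unfold Amin
  rcases eq_or_ne s [] with rfl | hne
  · rfl
  · obtain ⟨j, hj, hp⟩ := exists_good s hD hne
    obtain ⟨hmem, hle, hall⟩ := foldmin (delAt s) (List.range s.length) (List.replicate s.length 'z')
    set r := (List.range s.length).foldl
      (fun m k => if delAt s k < m then delAt s k else m) (List.replicate s.length 'z') with hr
    have hlt : delAt s j < List.replicate s.length 'z' := by
      rw [lt_repl _ _ (by rw [length_delAt s j hj]; omega)]
      exact hp
    have hrlt : r < List.replicate s.length 'z' :=
      lt_of_le_of_lt (hall j (List.mem_range.mpr hj)) hlt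
    rcases hmem with h1 | ⟨k, hk, h1⟩
    · rw [h1] at hrlt; exact absurd hrlt (lt_irrefl _)
    · obtain ⟨i0, hi0, hg⟩ := gdel_mem s hne
      have h2 : gdel s ≤ r := by
        rw [h1]; exact gdel_min s k (List.mem_range.mp hk)
      have h3 : r ≤ gdel s := by
        rw [hg]; exact hall i0 (List.mem_range.mpr hi0)
      exact le_antisymm h3 h2

-- under Dm no deletion beats the sentinel, so A's loop returns the sentinel itself
lemma Amin_eq_sentinel (s : List Char) (hD : Dm s) :
    Amin s = List.replicate s.length 'z' := by
  unfold Amin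
  obtain ⟨hmem, hle, hall⟩ := foldmin (delAt s) (List.range s.length) (List.replicate s.length 'z')
  rcases hmem with h1 | ⟨k, hk, h1⟩
  · exact h1
  · have hk' := List.mem_range.mp hk
    have hnope : ¬ delAt s k < List.replicate s.length 'z' := by
      rw [lt_repl _ _ (by rw [length_delAt s k hk']; omega)]
      exact Dm_not_Pc_del s hD k hk'
    exact le_antisymm hle (by rw [h1]; exact not_lt.mp hnope)

-- ===== VERDICT (by name: the statement is the Claim_ definition above) =====
theorem solution_spec : Claim_unchanged_solution := by
  intro S _ hD
  rw [solution_eq, alt_eq]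
  exact congrArg String.ofList (Amin_eq_gdel S.toList ((D_iff S).not.mp hD))

theorem solution_changed : Claim_changed_solution := by
  unfold Claim_changed_solution
  exact ⟨by decide, by decide, rfl, rfl, by simp [pvDiffWitnessOut_solution]⟩

theorem solution_tight : Claim_exact_solution := by
  intro S _ hD
  rw [solution_eq, alt_eq]
  intro h
  have h' : Amin S.toList = gdel S.toList := by
    simpa using congrArg String.toList h
  have hDm := (D_iff S).mp hD
  have h2 : (2 : Nat) ≤ S.toList.length := by
    have := hD.1
    calc (2:Nat) ≤ _ := this
    _ ≤ S.toList.length := List.length_filter_le _ _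
  have hlen := congrArg List.length h'
  rw [Amin_eq_sentinel S.toList hDm, gdel_length, List.length_replicate] at hlen
  omega
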